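-- pv_equiv track=rewrite | github.com/legacyboy/Geoff | src/narrative_report.py | _generate_findings_section
-- ===== SOURCE A (Python) =====
-- def _generate_findings_section(behavioral_flags: dict,
--                                 report_json: dict) -> str:
--     """Generate findings grouped by severity."""
--     all_flags = []
--     for dev_id, flags in behavioral_flags.items():
--         for flag in flags:
--             flag_copy = dict(flag)
--             flag_copy["device_id"] = dev_id
--             all_flags.append(flag_copy)
--
--     # Group by severity
--     by_severity = {
--         "CRITICAL": [], "HIGH": [], "MEDIUM": [], "LOW": []
--     }
--     for flag in all_flags:
--         sev = flag.get("severity", "LOW")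
--         if sev in by_severity:
--             by_severity[sev].append(flag)
--
--     lines = []
--     for severity in ("CRITICAL", "HIGH", "MEDIUM", "LOW"):
--         flags = by_severity[severity]
--         if not flags:
--             continue
--         lines.append(f"\n### {severity} ({len(flags)})")
--         for flag in flags[:20]:
--             lines.append(
--                 f"- **{flag.get('flag_type', '')}** "
--                 f"[{flag.get('device_id', '')}]: "
--                 f"{flag.get('summary', '')}")
--             if flag.get("explanation"):
--                 lines.append(
--                     f"  *{flag['explanation'][:200]}*")
--
--     if not any(by_severity.values()):
--         lines.append(
--             "No behavioral anomalies were detected across any device.")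
--
--     return "\n".join(lines)
-- ===== SOURCE B (Python) =====
-- def _generate_findings_section(behavioral_flags: dict,
--                                 report_json: dict) -> str:
--     """Generate findings grouped by severity (filter-per-severity, no bucket dict)."""
--     flat = [{**flag, "device_id": dev_id}
--             for dev_id, flags in behavioral_flags.items()
--             for flag in flags]
--
--     out = []
--     any_finding = False
--     for severity in ("CRITICAL", "HIGH", "MEDIUM", "LOW"):
--         group = [f for f in flat if f.get("severity", "LOW") == severity]
--         if not group:
--             continue
--         any_finding = True
--         out.append(f"\n### {severity} ({len(group)})")
--         for f in group[:20]:
--             out.append(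
--                 f"- **{f.get('flag_type', '')}** "
--                 f"[{f.get('device_id', '')}]: "
--                 f"{f.get('summary', '')}")
--             if f.get("explanation"):
--                 out.append(f"  *{f['explanation'][:200]}*")
--
--     if not any_finding:
--         out.append("No behavioral anomalies were detected across any device.")
--
--     return "\n".join(out)
-- ===== Notes on version B (the rewrite author's own statement) =====
-- stated objective: simpler
-- what changed: Replaces the fixed four-bucket dict (flatten, bucket pass, then iterate buckets) with a flatten comprehension and one stable filter per severity while walking the severity order, tracking emptiness with a flag instead of re-inspecting the buckets.
import Mathlib
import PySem

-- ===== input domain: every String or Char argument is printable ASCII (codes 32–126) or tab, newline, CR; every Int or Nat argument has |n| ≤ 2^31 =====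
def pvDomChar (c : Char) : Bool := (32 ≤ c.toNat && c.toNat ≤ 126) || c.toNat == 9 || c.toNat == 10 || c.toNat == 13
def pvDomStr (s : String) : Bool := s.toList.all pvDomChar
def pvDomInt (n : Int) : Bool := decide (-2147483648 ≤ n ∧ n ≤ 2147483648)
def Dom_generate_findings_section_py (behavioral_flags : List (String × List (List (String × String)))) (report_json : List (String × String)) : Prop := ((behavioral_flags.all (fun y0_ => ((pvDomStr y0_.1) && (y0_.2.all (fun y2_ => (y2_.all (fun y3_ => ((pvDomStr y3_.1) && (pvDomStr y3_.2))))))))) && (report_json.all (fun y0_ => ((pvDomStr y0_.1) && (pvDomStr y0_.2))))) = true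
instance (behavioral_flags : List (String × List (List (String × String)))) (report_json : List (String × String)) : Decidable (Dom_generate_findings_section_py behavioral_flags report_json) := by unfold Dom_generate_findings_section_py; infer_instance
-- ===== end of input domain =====

-- B replaces A's flatten/four-bucket-dict/bucket-walk with a flatten comprehension plus one
-- stable filter per severity in severity order, tracking emptiness with a flag: simpler, same O(n) cost.

-- ===== PORT A =====
def pvRowA (f : PySem.Dict String String) : List String :=
  ("- **" ++ f.getD "flag_type" "" ++ "** [" ++ f.getD "device_id" "" ++ "]: " ++ f.getD "summary" "") ::
  (if f.getD "explanation" "" ≠ "" then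
     ["  *" ++ PySem.Str.slice (f.getD "explanation" "") none (some 200) ++ "*"]
   else [])

def pvAllFlagsA (behavioral_flags : List (String × List (List (String × String)))) :
    List (PySem.Dict String String) :=
  (PySem.Dict.ofList behavioral_flags).items.foldl
    (fun acc p => p.2.foldl (fun a2 flag => a2 ++ [(PySem.Dict.ofList flag).insert "device_id" p.1]) acc)
    []

def pvBucketA (all : List (PySem.Dict String String)) :
    List (PySem.Dict String String) × List (PySem.Dict String String) ×
    List (PySem.Dict String String) × List (PySem.Dict String String) :=
  all.foldl
    (fun b f =>
      let sev := f.getD "severity" "LOW"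
      if sev = "CRITICAL" then (b.1 ++ [f], b.2.1, b.2.2.1, b.2.2.2)
      else if sev = "HIGH" then (b.1, b.2.1 ++ [f], b.2.2.1, b.2.2.2)
      else if sev = "MEDIUM" then (b.1, b.2.1, b.2.2.1 ++ [f], b.2.2.2)
      else if sev = "LOW" then (b.1, b.2.1, b.2.2.1, b.2.2.2 ++ [f])
      else b)
    ([], [], [], [])

def pvSectionA (severity : String) (flags : List (PySem.Dict String String)) : List String :=
  if flags = [] then []
  else ("\n### " ++ severity ++ " (" ++ PySem.Int.toStr (flags.length : Int) ++ ")") ::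
    (PySem.List.slice flags none (some 20)).foldl (fun ls f => ls ++ pvRowA f) []

def generate_findings_section_py (behavioral_flags : List (String × List (List (String × String)))) (report_json : List (String × String)) : String :=
  let all_flags := pvAllFlagsA behavioral_flags
  let b := pvBucketA all_flags
  let lines := pvSectionA "CRITICAL" b.1 ++ pvSectionA "HIGH" b.2.1 ++
               pvSectionA "MEDIUM" b.2.2.1 ++ pvSectionA "LOW" b.2.2.2
  let lines2 :=
    if b.1.isEmpty && b.2.1.isEmpty && b.2.2.1.isEmpty && b.2.2.2.isEmpty then
      lines ++ ["No behavioral anomalies were detected across any device."]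
    else lines
  PySem.Str.join "\n" lines2

-- ===== PORT B =====
def pvRowB (f : PySem.Dict String String) : List String :=
  ("- **" ++ f.getD "flag_type" "" ++ "** [" ++ f.getD "device_id" "" ++ "]: " ++ f.getD "summary" "") ::
  (if f.getD "explanation" "" ≠ "" then
     ["  *" ++ PySem.Str.slice (f.getD "explanation" "") none (some 200) ++ "*"]
   else [])

def pvFlatB (behavioral_flags : List (String × List (List (String × String)))) :
    List (PySem.Dict String String) :=
  (PySem.Dict.ofList behavioral_flags).items.flatMap
    (fun p => p.2.map (fun flag => (PySem.Dict.ofList flag).insert "device_id" p.1))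

def pvStepB (flat : List (PySem.Dict String String)) (acc : List String × Bool) (sev : String) :
    List String × Bool :=
  let group := flat.filter (fun f => f.getD "severity" "LOW" == sev)
  if group.isEmpty then acc
  else
    (acc.1 ++ ("\n### " ++ sev ++ " (" ++ PySem.Int.toStr (group.length : Int) ++ ")") ::
       (PySem.List.slice group none (some 20)).foldl (fun ls f => ls ++ pvRowB f) [],
     true)

def generate_findings_section_py_alt (behavioral_flags : List (String × List (List (String × String)))) (report_json : List (String × String)) : String :=
  let flat := pvFlatB behavioral_flags
  let r := ["CRITICAL", "HIGH", "MEDIUM", "LOW"].foldl (pvStepB flat) ([], false)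
  PySem.Str.join "\n"
    (if r.2 then r.1 else r.1 ++ ["No behavioral anomalies were detected across any device."])

-- ===== PRECONDITION & SPEC =====
def Spec_generate_findings_section_py (behavioral_flags : List (String × List (List (String × String)))) (report_json : List (String × String)) (out : String) : Prop := out = generate_findings_section_py_alt behavioral_flags report_json
instance (behavioral_flags : List (String × List (List (String × String)))) (report_json : List (String × String)) (out : String) : Decidable (Spec_generate_findings_section_py behavioral_flags report_json out) := by unfold Spec_generate_findings_section_py; infer_instance

-- ===== CLAIM (what is proved, stated in full; the proofs are below) =====
def Claim_equal_generate_findings_section_py : Prop := ∀ (behavioral_flags : List (String × List (List (String × String)))) (report_json : List (String × String)), Dom_generate_findings_section_py behavioral_flags report_json → Spec_generate_findings_section_py behavioral_flags report_json (generate_findings_section_py behavioral_flags report_json)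

-- ===== LEMMAS AND PROOFS =====

theorem pvFoldlPush {α β : Type} (g : α → β) (l : List α) (acc : List β) :
    l.foldl (fun a x => a ++ [g x]) acc = acc ++ l.map g := by
  induction l generalizing acc with
  | nil => simp
  | cons x xs ih => simp [ih]

theorem pvAllFlagsA_eq_flat (bf : List (String × List (List (String × String)))) :
    pvAllFlagsA bf = pvFlatB bf := by
  unfold pvAllFlagsA pvFlatB
  generalize (PySem.Dict.ofList bf).items = l
  suffices h : ∀ (acc : List (PySem.Dict String String)),
      l.foldl (fun acc p => p.2.foldl (fun a2 flag => a2 ++ [(PySem.Dict.ofList flag).insert "device_id" p.1]) acc) acc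
      = acc ++ l.flatMap (fun p => p.2.map (fun flag => (PySem.Dict.ofList flag).insert "device_id" p.1)) by
    simpa using h []
  induction l with
  | nil => intro acc; simp
  | cons p ps ih =>
    intro acc
    rw [List.foldl_cons, pvFoldlPush, ih]
    simp [List.flatMap_cons]

theorem pvBucketA_eq (all : List (PySem.Dict String String)) :
    pvBucketA all =
      (all.filter (fun f => f.getD "severity" "LOW" == "CRITICAL"),
       all.filter (fun f => f.getD "severity" "LOW" == "HIGH"),
       all.filter (fun f => f.getD "severity" "LOW" == "MEDIUM"),
       all.filter (fun f => f.getD "severity" "LOW" == "LOW")) := by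
  unfold pvBucketA
  suffices h : ∀ (c h m l : List (PySem.Dict String String)),
      all.foldl
        (fun b f =>
          let sev := f.getD "severity" "LOW"
          if sev = "CRITICAL" then (b.1 ++ [f], b.2.1, b.2.2.1, b.2.2.2)
          else if sev = "HIGH" then (b.1, b.2.1 ++ [f], b.2.2.1, b.2.2.2)
          else if sev = "MEDIUM" then (b.1, b.2.1, b.2.2.1 ++ [f], b.2.2.2)
          else if sev = "LOW" then (b.1, b.2.1, b.2.2.1, b.2.2.2 ++ [f])
          else b)
        (c, h, m, l)
      = (c ++ all.filter (fun f => f.getD "severity" "LOW" == "CRITICAL"),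
         h ++ all.filter (fun f => f.getD "severity" "LOW" == "HIGH"),
         m ++ all.filter (fun f => f.getD "severity" "LOW" == "MEDIUM"),
         l ++ all.filter (fun f => f.getD "severity" "LOW" == "LOW")) by
    simpa using h [] [] [] []
  induction all with
  | nil => intro c h m l; simp
  | cons f fs ih =>
    intro c h m l
    simp only [List.foldl_cons, List.filter_cons]
    by_cases h1 : f.getD "severity" "LOW" = "CRITICAL"
    · simp [h1, ih]
    · by_cases h2 : f.getD "severity" "LOW" = "HIGH"
      · simp [h2, ih]
      · by_cases h3 : f.getD "severity" "LOW" = "MEDIUM"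
        · simp [h3, ih]
        · by_cases h4 : f.getD "severity" "LOW" = "LOW"
          · simp [h4, ih]
          · simp [h1, h2, h3, h4, ih]

theorem pvRowA_eq_rowB (f : PySem.Dict String String) : pvRowA f = pvRowB f := rfl

theorem pvSectionA_eq_step (flat : List (PySem.Dict String String)) (acc : List String × Bool)
    (sev : String) :
    pvStepB flat acc sev =
      (acc.1 ++ pvSectionA sev (flat.filter (fun f => f.getD "severity" "LOW" == sev)),
       if (flat.filter (fun f => f.getD "severity" "LOW" == sev)).isEmpty then acc.2 else true) := by
  unfold pvStepB pvSectionA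
  by_cases h : (flat.filter (fun f => f.getD "severity" "LOW" == sev)) = []
  · simp [h]
  · simp [h, List.isEmpty_iff, pvRowA_eq_rowB]

-- ===== VERDICT (by name: the statement is the Claim_ definition above) =====
theorem generate_findings_section_py_spec : Claim_equal_generate_findings_section_py := by
  intro bf rj _
  unfold Spec_generate_findings_section_py
  unfold generate_findings_section_py generate_findings_section_py_alt
  dsimp only
  rw [pvAllFlagsA_eq_flat, pvBucketA_eq]
  simp only [List.foldl_cons, List.foldl_nil, pvSectionA_eq_step]
  simp only [List.append_assoc, List.nil_append]
  by_cases h1 : (pvFlatB bf).filter (fun f => f.getD "severity" "LOW" == "CRITICAL") = [] <;>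
  by_cases h2 : (pvFlatB bf).filter (fun f => f.getD "severity" "LOW" == "HIGH") = [] <;>
  by_cases h3 : (pvFlatB bf).filter (fun f => f.getD "severity" "LOW" == "MEDIUM") = [] <;>
  by_cases h4 : (pvFlatB bf).filter (fun f => f.getD "severity" "LOW" == "LOW") = [] <;>
  simp [h1, h2, h3, h4, List.isEmpty_iff, pvSectionA]
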